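-- pv_equiv track=rewrite | github.com/Obliterating/Various-Python-Scripts | Calculator.py | zeCalculater
-- ===== SOURCE A (Python) =====
-- def zeCalculater(x):
-- 	x = int(x)
-- 	if x >= 0:
-- 		z = 1
-- 		total_pegs = 16
-- 		while (x+1) != z:
-- 			#print (z)
-- 			#print (x)
-- 			#print (str((4+(z*2))*(4+(z*2))))
-- 			total_pegs += ((4+z)*(4+z))
-- 			#print (total_pegs)
-- 			z += 1
-- 		return ("This is the total amount of pegs: " + str(total_pegs))
--
--
-- 	else:
-- 		return ("Please enter a whole number, which is a positive number that is not a decimal, but could be zero.")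
-- ===== SOURCE B (Python) =====
-- def zeCalculater(x):
--     x = int(x)
--     if x >= 0:
--         # sum_{z=1..x} (4+z)^2 = S(x+4) - S(4), S(n) = n(n+1)(2n+1)/6; S(4) = 30
--         n = x + 4
--         total_pegs = 16 + n * (n + 1) * (2 * n + 1) // 6 - 30
--         return "This is the total amount of pegs: " + str(total_pegs)
--     else:
--         return "Please enter a whole number, which is a positive number that is not a decimal, but could be zero."
-- ===== Notes on version B (the rewrite author's own statement) =====
-- stated objective: faster
-- what changed: Replaces the O(x) while-loop accumulation of (4+z)^2 with the closed-form sum-of-squares formula evaluated in O(1).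
import Mathlib
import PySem

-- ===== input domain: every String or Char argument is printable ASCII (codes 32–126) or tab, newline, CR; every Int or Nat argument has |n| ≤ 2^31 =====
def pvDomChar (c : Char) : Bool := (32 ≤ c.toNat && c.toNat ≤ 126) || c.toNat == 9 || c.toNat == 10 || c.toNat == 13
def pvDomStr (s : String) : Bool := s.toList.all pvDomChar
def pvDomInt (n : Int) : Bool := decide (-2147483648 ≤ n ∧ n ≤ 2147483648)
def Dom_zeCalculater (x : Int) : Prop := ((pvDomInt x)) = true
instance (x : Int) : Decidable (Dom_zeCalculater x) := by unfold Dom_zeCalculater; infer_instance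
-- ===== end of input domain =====

-- B replaces A's O(x) peg-summing loop with the closed-form sum-of-squares formula (O(1)).


-- ===== PORT A =====
-- A's while-loop: z counts up from 1 until x+1 = z, accumulating (4+z)^2.
-- The stop test 'x+1 ≤ z' coincides with Python's '(x+1) != z' on every reachable state
-- (loop entered only with x ≥ 0, z = 1 ≤ x+1); the ≤ form is a totality guard only.
def zeCalcLoop (x z total : Int) : Int :=
  if x + 1 ≤ z then total
  else zeCalcLoop x (z + 1) (total + (4 + z) * (4 + z))
termination_by (x + 1 - z).toNat
decreasing_by omega

def zeCalculater (x : Int) : String :=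
  if x ≥ 0 then
    "This is the total amount of pegs: " ++ PySem.Int.toStr (zeCalcLoop x 1 16)
  else
    "Please enter a whole number, which is a positive number that is not a decimal, but could be zero."

-- ===== PORT B =====
def zeCalculater_alt (x : Int) : String :=
  if x ≥ 0 then
    let n := x + 4
    "This is the total amount of pegs: " ++
      PySem.Int.toStr (16 + PySem.Int.floordiv (n * (n + 1) * (2 * n + 1)) 6 - 30)
  else
    "Please enter a whole number, which is a positive number that is not a decimal, but could be zero."

-- ===== PRECONDITION & SPEC =====
def Spec_zeCalculater (x : Int) (out : String) : Prop := out = zeCalculater_alt x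
instance (x : Int) (out : String) : Decidable (Spec_zeCalculater x out) := by unfold Spec_zeCalculater; infer_instance

-- ===== CLAIM (what is proved, stated in full; the proofs are below) =====
def Claim_equal_zeCalculater : Prop := ∀ (x : Int), Dom_zeCalculater x → Spec_zeCalculater x (zeCalculater x)

-- ===== LEMMAS AND PROOFS =====

-- the loop run for k more steps adds Σ_{i<k} (4+z+i)^2
theorem zeCalcLoop_eq_sum (k : Nat) : ∀ (z t : Int),
    zeCalcLoop (z + k - 1) z t = t + ∑ i ∈ Finset.range k, (4 + z + (i : Int)) ^ 2 := by
  induction k with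
  | zero => intro z t; rw [zeCalcLoop]; simp
  | succ k ih =>
    intro z t
    rw [zeCalcLoop]
    have hlt : ¬ (z + (k + 1 : Nat) - 1 + 1 ≤ z) := by push_cast; omega
    rw [if_neg hlt]
    have harg : z + ((k + 1 : Nat) : Int) - 1 = (z + 1) + (k : Int) - 1 := by push_cast; ring
    rw [harg, ih (z + 1) (t + (4 + z) * (4 + z))]
    rw [Finset.sum_range_succ']
    have hc : ∀ i ∈ Finset.range k, (4 + z + ((i + 1 : Nat) : Int)) ^ 2 = (4 + (z + 1) + (i : Int)) ^ 2 := by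
      intro i _; push_cast; ring
    rw [Finset.sum_congr rfl hc]
    ring

-- closed form of the sum (multiplied through by 6)
theorem sum_sq_closed (k : Nat) :
    6 * ∑ i ∈ Finset.range k, (4 + 1 + (i : Int)) ^ 2 = ((k : Int) + 4) * ((k : Int) + 5) * (2 * (k : Int) + 9) - 180 := by
  induction k with
  | zero => simp
  | succ k ih =>
    rw [Finset.sum_range_succ, mul_add, ih]
    push_cast
    ring

theorem loop_eq_formula (x : Int) (hx : 0 ≤ x) :
    zeCalcLoop x 1 16 = 16 + PySem.Int.floordiv ((x + 4) * (x + 4 + 1) * (2 * (x + 4) + 1)) 6 - 30 := by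
  obtain ⟨k, rfl⟩ : ∃ k : Nat, x = (k : Int) := ⟨x.toNat, (Int.toNat_of_nonneg hx).symm⟩
  have hsum := zeCalcLoop_eq_sum k 1 16
  rw [show (1 : Int) + (k : Int) - 1 = (k : Int) by ring] at hsum
  have hclosed := sum_sq_closed k
  have hdiv : ((k : Int) + 4) * ((k : Int) + 4 + 1) * (2 * ((k : Int) + 4) + 1)
      = 6 * (∑ i ∈ Finset.range k, (4 + 1 + (i : Int)) ^ 2 + 30) := by
    have : ((k : Int) + 4) * ((k : Int) + 4 + 1) * (2 * ((k : Int) + 4) + 1)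
        = ((k : Int) + 4) * ((k : Int) + 5) * (2 * (k : Int) + 9) := by ring
    omega
  rw [hsum, hdiv, PySem.Int.floordiv_eq_ediv_of_pos (by norm_num)]
  rw [Int.mul_ediv_cancel_left _ (by norm_num : (6 : Int) ≠ 0)]
  ring

-- ===== VERDICT (by name: the statement is the Claim_ definition above) =====
theorem zeCalculater_spec : Claim_equal_zeCalculater := by
  intro x _
  unfold Spec_zeCalculater zeCalculater zeCalculater_alt
  by_cases hx : x ≥ 0
  · simp only [hx, if_true]
    rw [loop_eq_formula x hx]
  · simp [hx]
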